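-- pv_equiv track=rewrite | github.com/SonghaiFan/mystic-tarot | scripts/export_ground_truth.py | strip_js_comments
-- ===== SOURCE A (Python) =====
-- def strip_js_comments(source: str) -> str:
--     result: list[str] = []
--     i = 0
--     in_string: str | None = None
--
--     while i < len(source):
--         ch = source[i]
--         nxt = source[i + 1] if i + 1 < len(source) else ""
--         prev = source[i - 1] if i > 0 else ""
--
--         if in_string:
--             result.append(ch)
--             if ch == in_string and prev != "\\":
--                 in_string = None
--             i += 1
--             continue
--
--         if ch in {"'", '"', "`"}:
--             in_string = ch
--             result.append(ch)
--             i += 1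
--             continue
--
--         if ch == "/" and nxt == "/":
--             i += 2
--             while i < len(source) and source[i] != "\n":
--                 i += 1
--             continue
--
--         if ch == "/" and nxt == "*":
--             i += 2
--             while i + 1 < len(source) and not (source[i] == "*" and source[i + 1] == "/"):
--                 i += 1
--             i += 2
--             continue
--
--         result.append(ch)
--         i += 1
--
--     return "".join(result)
-- ===== SOURCE B (Python) =====
-- def strip_js_comments(source: str) -> str:
--     # Single-pass finite-state machine: one character at a time, no lookahead.
--     NORMAL, STRING, LINE, BLOCK = 0, 1, 2, 3
--     out: list[str] = []
--     state = NORMAL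
--     quote = ""
--     prev = ""        # raw previous character of the source
--     pending = False  # a '/' seen in NORMAL, not yet classified
--     star = False     # in BLOCK: previous char was '*'
--     for ch in source:
--         if state == NORMAL:
--             if pending:
--                 pending = False
--                 if ch == "/":
--                     state = LINE
--                 elif ch == "*":
--                     state = BLOCK
--                     star = False
--                 elif ch in ("'", '"', "`"):
--                     out.append("/")
--                     out.append(ch)
--                     state = STRING
--                     quote = ch
--                 else:
--                     out.append("/")
--                     out.append(ch)
--             elif ch in ("'", '"', "`"):
--                 state = STRING
--                 quote = ch
--                 out.append(ch)
--             elif ch == "/":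
--                 pending = True
--             else:
--                 out.append(ch)
--         elif state == STRING:
--             out.append(ch)
--             if ch == quote and prev != "\\":
--                 state = NORMAL
--         elif state == LINE:
--             if ch == "\n":
--                 state = NORMAL
--                 out.append(ch)
--         else:  # BLOCK
--             if star and ch == "/":
--                 state = NORMAL
--                 star = False
--             else:
--                 star = (ch == "*")
--         prev = ch
--     if pending:
--         out.append("/")
--     return "".join(out)
-- ===== Notes on version B (the rewrite author's own statement) =====
-- stated objective: faster
-- what changed: Replaced A's index-based scanner with two-character lookahead and nested comment-consuming while loops by a single-pass four-state machine (NORMAL/STRING/LINE/BLOCK) with a pending-slash flag that processes one character per iteration with no lookahead, no per-character slicing/indexing and no inner loops.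
import Mathlib
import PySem

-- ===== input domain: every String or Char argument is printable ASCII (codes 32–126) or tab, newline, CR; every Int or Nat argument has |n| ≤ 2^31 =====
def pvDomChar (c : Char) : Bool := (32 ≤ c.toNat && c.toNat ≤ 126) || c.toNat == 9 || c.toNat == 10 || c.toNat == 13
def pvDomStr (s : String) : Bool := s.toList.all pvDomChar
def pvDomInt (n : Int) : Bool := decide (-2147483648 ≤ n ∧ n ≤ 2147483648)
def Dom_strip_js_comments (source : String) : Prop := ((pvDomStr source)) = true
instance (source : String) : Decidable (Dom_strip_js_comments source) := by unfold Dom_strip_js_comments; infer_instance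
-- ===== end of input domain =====

-- B replaces A's index/lookahead scanner (with inner comment-consuming while loops) by a
-- single-pass four-state machine over the characters (objective: alternative decomposition).

-- ===== PORT A =====
-- inner while of the line-comment branch: advance i while source[i] != '\n'
def aSkipLine (src : List Char) (i : Nat) : Nat :=
  if _ : i < src.length then
    if src[i]! = '\n' then i else aSkipLine src (i + 1)
  else i
termination_by src.length - i

-- inner while of the block-comment branch: advance i while not (source[i]='*' and source[i+1]='/')
def aSkipBlock (src : List Char) (i : Nat) : Nat :=
  if _ : i + 1 < src.length then
    if src[i]! = '*' ∧ src[i+1]! = '/' then i else aSkipBlock src (i + 1)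
  else i
termination_by src.length - i

theorem aSkipLine_le (src : List Char) (i : Nat) : i ≤ aSkipLine src i := by
  unfold aSkipLine
  split
  · split
    · exact le_refl _
    · exact le_trans (Nat.le_succ i) (aSkipLine_le src (i+1))
  · exact le_refl _
termination_by src.length - i

theorem aSkipBlock_le (src : List Char) (i : Nat) : i ≤ aSkipBlock src i := by
  unfold aSkipBlock
  split
  · split
    · exact le_refl _
    · exact le_trans (Nat.le_succ i) (aSkipBlock_le src (i+1))
  · exact le_refl _
termination_by src.length - i

-- A's main while loop: index i, in_string state, accumulated result
def aLoop (src : List Char) (i : Nat) (instr : Option Char) (result : List Char) : List Char :=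
  if _ : i < src.length then
    let ch := src[i]!
    match instr with
    | some q =>
        -- prev = source[i-1] if i > 0 else ""; close when ch == q and prev != '\\'
        let instr' := if ch = q ∧ (i = 0 ∨ src[i-1]! ≠ '\\') then none else some q
        aLoop src (i + 1) instr' (result ++ [ch])
    | none =>
        if ch = '\'' ∨ ch = '"' ∨ ch = '`' then
          aLoop src (i + 1) (some ch) (result ++ [ch])
        else if ch = '/' ∧ (i + 1 < src.length ∧ src[i+1]! = '/') then
          aLoop src (aSkipLine src (i + 2)) none result
        else if ch = '/' ∧ (i + 1 < src.length ∧ src[i+1]! = '*') then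
          aLoop src (aSkipBlock src (i + 2) + 2) none result
        else
          aLoop src (i + 1) none (result ++ [ch])
  else result
termination_by src.length - i
decreasing_by
  · omega
  · omega
  · have := aSkipLine_le src (i + 2); omega
  · have := aSkipBlock_le src (i + 2); omega
  · omega

def strip_js_comments (source : String) : String :=
  String.mk (aLoop source.toList 0 none [])

-- ===== PORT B =====
inductive BMode
  | normal
  | str : Char → BMode   -- inside a string, with its quote char
  | line
  | block
deriving DecidableEq, Repr

-- B's single for-loop over the characters; prev = raw previous char, pending = unclassified '/',
-- star = (in BLOCK) previous char was '*'
def bLoop (cs : List Char) (mode : BMode) (pending star : Bool) (prev : Option Char)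
    (out : List Char) : List Char :=
  match cs with
  | [] => if pending then out ++ ['/'] else out
  | ch :: rest =>
    match mode with
    | .normal =>
        if pending then
          if ch = '/' then bLoop rest .line false star (some ch) out
          else if ch = '*' then bLoop rest .block false false (some ch) out
          else if ch = '\'' ∨ ch = '"' ∨ ch = '`' then
            bLoop rest (.str ch) false star (some ch) (out ++ ['/', ch])
          else
            bLoop rest .normal false star (some ch) (out ++ ['/', ch])
        else if ch = '\'' ∨ ch = '"' ∨ ch = '`' then
          bLoop rest (.str ch) false star (some ch) (out ++ [ch])
        else if ch = '/' then bLoop rest .normal true star (some ch) out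
        else bLoop rest .normal false star (some ch) (out ++ [ch])
    | .str q =>
        let mode' := if ch = q ∧ prev ≠ some '\\' then BMode.normal else .str q
        bLoop rest mode' false star (some ch) (out ++ [ch])
    | .line =>
        if ch = '\n' then bLoop rest .normal false star (some ch) (out ++ [ch])
        else bLoop rest .line false star (some ch) out
    | .block =>
        if star ∧ ch = '/' then bLoop rest .normal false false (some ch) out
        else bLoop rest .block false (decide (ch = '*')) (some ch) out

def strip_js_comments_alt (source : String) : String :=
  String.mk (bLoop source.toList .normal false false none [])

-- ===== PRECONDITION & SPEC =====
def Spec_strip_js_comments (source : String) (out : String) : Prop := out = strip_js_comments_alt source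
instance (source : String) (out : String) : Decidable (Spec_strip_js_comments source out) := by unfold Spec_strip_js_comments; infer_instance

-- ===== CLAIM (what is proved, stated in full; the proofs are below) =====
def Claim_equal_strip_js_comments : Prop := ∀ (source : String), Dom_strip_js_comments source → Spec_strip_js_comments source (strip_js_comments source)

-- ===== LEMMAS AND PROOFS =====

theorem aLoop_ge (src : List Char) (i : Nat) (instr : Option Char) (out : List Char)
    (h : src.length ≤ i) : aLoop src i instr out = out := by
  unfold aLoop
  simp [Nat.not_lt.mpr h]

theorem aSkipLine_ge (src : List Char) (i : Nat) (h : src.length ≤ i) : aSkipLine src i = i := by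
  unfold aSkipLine; rw [dif_neg (by omega)]

theorem aSkipBlock_ge (src : List Char) (i : Nat) (h : src.length ≤ i + 1) : aSkipBlock src i = i := by
  unfold aSkipBlock; rw [dif_neg (by omega)]

-- the four loop-alignment statements, at position i of A's scan
def LoopInv (src : List Char) (i : Nat) : Prop :=
    (∀ (star : Bool) (prev : Option Char) (out : List Char),
        aLoop src i none out = bLoop (src.drop i) .normal false star prev out)
  ∧ (∀ (q : Char) (star : Bool) (out : List Char), 0 < i →
        aLoop src i (some q) out = bLoop (src.drop i) (.str q) false star (some src[i-1]!) out)
  ∧ (∀ (star : Bool) (prev : Option Char) (out : List Char),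
        aLoop src (aSkipLine src i) none out = bLoop (src.drop i) .line false star prev out)
  ∧ (∀ (s : Bool) (prev : Option Char) (out : List Char), (s = true → 0 < i ∧ src[i-1]! = '*') →
        aLoop src (aSkipBlock src (if s then i - 1 else i) + 2) none out = bLoop (src.drop i) .block false s prev out)

theorem inv_atEnd (src : List Char) (i : Nat) (h : src.length ≤ i) : LoopInv src i := by
  have hd : src.drop i = [] := List.drop_eq_nil_of_le h
  refine ⟨?_, ?_, ?_, ?_⟩
  · intro star prev out
    rw [hd, aLoop_ge src i none out h]; rfl
  · intro q star out _
    rw [hd, aLoop_ge src i (some q) out h]; rfl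
  · intro star prev out
    rw [hd, aSkipLine_ge src i h, aLoop_ge src _ none out (by omega)]; rfl
  · intro s prev out hs
    rw [hd]
    cases s with
    | false =>
      rw [if_neg Bool.false_ne_true, aSkipBlock_ge src i (by omega),
        aLoop_ge src (i + 2) none out (by omega)]; rfl
    | true =>
      obtain ⟨hi0, _⟩ := hs rfl
      rw [if_pos rfl, aSkipBlock_ge src (i - 1) (by omega),
        aLoop_ge src (i - 1 + 2) none out (by omega)]; rfl

theorem inv_all (src : List Char) : ∀ (n i : Nat), src.length - i ≤ n → LoopInv src i := by
  intro n
  induction n with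
  | zero =>
    intro i hi
    exact inv_atEnd src i (by omega)
  | succ n IH =>
    intro i hi
    by_cases h : i < src.length
    case neg => exact inv_atEnd src i (by omega)
    have hget : src[i]! = src[i] := getElem!_pos src i h
    have hdrop : src.drop i = src[i] :: src.drop (i + 1) := List.drop_eq_getElem_cons h
    have IH1 := (IH (i + 1) (by omega)).1
    have IH2 := (IH (i + 1) (by omega)).2.1
    refine ⟨?_, ?_, ?_, ?_⟩
    · -- NORMAL
      intro star prev out
      rw [hdrop]
      unfold aLoop
      rw [dif_pos h]
      simp only [hget]
      by_cases hq : src[i] = '\'' ∨ src[i] = '"' ∨ src[i] = '`'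
      · -- opens a string
        rw [if_pos hq]
        have hsl : ¬ src[i] = '/' := by rcases hq with h1 | h1 | h1 <;> simp [h1]
        have hstep : bLoop (src[i] :: src.drop (i + 1)) .normal false star prev out
            = bLoop (src.drop (i + 1)) (.str src[i]) false star (some src[i]) (out ++ [src[i]]) := by
          conv_lhs => rw [bLoop.eq_def]
          simp [hq]
        rw [hstep]
        have := IH2 src[i] star (out ++ [src[i]]) (by omega)
        simpa [hget] using this
      · by_cases hsl : src[i] = '/'
        · -- slash: A looks ahead, B sets pending
          have hstep : bLoop (src[i] :: src.drop (i + 1)) .normal false star prev out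
              = bLoop (src.drop (i + 1)) .normal true star (some src[i]) out := by
            conv_lhs => rw [bLoop.eq_def]
            simp [hsl]
          rw [hstep]
          by_cases h2 : i + 1 < src.length
          · have hget2 : src[i+1]! = src[i+1] := getElem!_pos src (i+1) h2
            have hdrop2 : src.drop (i + 1) = src[i+1] :: src.drop (i + 2) := List.drop_eq_getElem_cons h2
            by_cases hll : src[i+1] = '/'
            · -- line comment
              rw [if_neg hq, if_pos ⟨hsl, h2, by rw [hget2]; exact hll⟩]
              rw [hdrop2]
              have hstep2 : bLoop (src[i+1] :: src.drop (i + 2)) .normal true star (some src[i]) out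
                  = bLoop (src.drop (i + 2)) .line false star (some src[i+1]) out := by
                conv_lhs => rw [bLoop.eq_def]
                simp [hll]
              rw [hstep2]
              exact (IH (i + 2) (by omega)).2.2.1 star (some src[i+1]) out
            · by_cases hbb : src[i+1] = '*'
              · -- block comment
                rw [if_neg hq, if_neg (by rw [hget2]; tauto), if_pos ⟨hsl, h2, by rw [hget2]; exact hbb⟩]
                rw [hdrop2]
                have hstep2 : bLoop (src[i+1] :: src.drop (i + 2)) .normal true star (some src[i]) out
                    = bLoop (src.drop (i + 2)) .block false false (some src[i+1]) out := by
                  conv_lhs => rw [bLoop.eq_def]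
                  simp [hbb]
                rw [hstep2]
                have := (IH (i + 2) (by omega)).2.2.2 false (some src[i+1]) out (by simp)
                rw [if_neg Bool.false_ne_true] at this
                exact this
              · -- lone slash followed by an ordinary char
                rw [if_neg hq, if_neg (by rw [hget2]; tauto), if_neg (by rw [hget2]; tauto)]
                unfold aLoop
                rw [dif_pos h2]
                simp only [hget2]
                rw [hdrop2]
                by_cases hq2 : src[i+1] = '\'' ∨ src[i+1] = '"' ∨ src[i+1] = '`'
                · rw [if_pos hq2]
                  have hstep2 : bLoop (src[i+1] :: src.drop (i + 2)) .normal true star (some src[i]) out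
                      = bLoop (src.drop (i + 2)) (.str src[i+1]) false star (some src[i+1]) (out ++ ['/', src[i+1]]) := by
                    conv_lhs => rw [bLoop.eq_def]
                    simp [hll, hbb, hq2]
                  rw [hstep2]
                  have := (IH (i + 2) (by omega)).2.1 src[i+1] star (out ++ [src[i]] ++ [src[i+1]]) (by omega)
                  rw [this]
                  have hgx : src[i + 2 - 1]! = src[i+1] := by
                    have e : i + 2 - 1 = i + 1 := by omega
                    rw [e, hget2]
                  rw [hgx, hsl]
                  simp
                · rw [if_neg hq2, if_neg (by tauto), if_neg (by tauto)]
                  have hstep2 : bLoop (src[i+1] :: src.drop (i + 2)) .normal true star (some src[i]) out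
                      = bLoop (src.drop (i + 2)) .normal false star (some src[i+1]) (out ++ ['/', src[i+1]]) := by
                    conv_lhs => rw [bLoop.eq_def]
                    simp [hll, hbb, hq2]
                  rw [hstep2]
                  have := (IH (i + 2) (by omega)).1 star (some src[i+1]) (out ++ [src[i]] ++ [src[i+1]])
                  rw [this, hsl]
                  simp
          · -- slash is the last character
            have hd2 : src.drop (i + 1) = [] := List.drop_eq_nil_of_le (by omega)
            rw [if_neg hq, if_neg (by tauto), if_neg (by tauto)]
            rw [aLoop_ge src (i + 1) none (out ++ [src[i]]) (by omega), hd2, hsl]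
            rfl
        · -- ordinary character
          rw [if_neg hq, if_neg (by tauto), if_neg (by tauto)]
          have hstep : bLoop (src[i] :: src.drop (i + 1)) .normal false star prev out
              = bLoop (src.drop (i + 1)) .normal false star (some src[i]) (out ++ [src[i]]) := by
            conv_lhs => rw [bLoop.eq_def]
            simp [hq, hsl]
          rw [hstep]
          exact IH1 star (some src[i]) (out ++ [src[i]])
    · -- STRING
      intro q star out hi0
      have hgp : src[i-1]! = src[i-1] := getElem!_pos src (i-1) (by omega)
      rw [hdrop, hgp]
      unfold aLoop
      rw [dif_pos h]
      simp only [hget, hgp]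
      by_cases hc : src[i] = q ∧ src[i-1] ≠ '\\'
      · rw [if_pos ⟨hc.1, Or.inr hc.2⟩]
        have hstep : bLoop (src[i] :: src.drop (i + 1)) (.str q) false star (some src[i-1]) out
            = bLoop (src.drop (i + 1)) .normal false star (some src[i]) (out ++ [src[i]]) := by
          conv_lhs => rw [bLoop.eq_def]
          simp [hc.1, hc.2]
        rw [hstep]
        exact IH1 star (some src[i]) (out ++ [src[i]])
      · have hneg : ¬ (src[i] = q ∧ (i = 0 ∨ src[i-1] ≠ '\\')) := by
          rintro ⟨h1, h2 | h2⟩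
          · omega
          · exact hc ⟨h1, h2⟩
        rw [if_neg hneg]
        have hstep : bLoop (src[i] :: src.drop (i + 1)) (.str q) false star (some src[i-1]) out
            = bLoop (src.drop (i + 1)) (.str q) false star (some src[i]) (out ++ [src[i]]) := by
          conv_lhs => rw [bLoop.eq_def]
          simp [hc]
        rw [hstep]
        have := IH2 q star (out ++ [src[i]]) (by omega)
        simpa [hget] using this
    · -- LINE
      intro star prev out
      rw [hdrop]
      conv_lhs => rw [aSkipLine]
      rw [dif_pos h]
      simp only [hget]
      by_cases hn : src[i] = '\n'
      · rw [if_pos hn]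
        unfold aLoop
        rw [dif_pos h]
        simp only [hget]
        rw [if_neg (by rw [hn]; decide), if_neg (by rw [hn]; simp), if_neg (by rw [hn]; simp)]
        have hstep : bLoop (src[i] :: src.drop (i + 1)) .line false star prev out
            = bLoop (src.drop (i + 1)) .normal false star (some src[i]) (out ++ [src[i]]) := by
          conv_lhs => rw [bLoop.eq_def]
          simp [hn]
        rw [hstep]
        exact IH1 star (some src[i]) (out ++ [src[i]])
      · rw [if_neg hn]
        have hstep : bLoop (src[i] :: src.drop (i + 1)) .line false star prev out
            = bLoop (src.drop (i + 1)) .line false star (some src[i]) out := by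
          conv_lhs => rw [bLoop.eq_def]
          simp [hn]
        rw [hstep]
        exact (IH (i + 1) (by omega)).2.2.1 star (some src[i]) out
    · -- BLOCK
      intro s prev out hs
      rw [hdrop]
      cases s with
      | true =>
        obtain ⟨hi0, hstar⟩ := hs rfl
        rw [if_pos rfl]
        by_cases hsl : src[i] = '/'
        · -- closing */ found
          have hstep : bLoop (src[i] :: src.drop (i + 1)) .block false true prev out
              = bLoop (src.drop (i + 1)) .normal false false (some src[i]) out := by
            conv_lhs => rw [bLoop.eq_def]
            simp [hsl]
          rw [hstep, ← IH1 false (some src[i]) out]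
          have hA : aSkipBlock src (i - 1) = i - 1 := by
            conv_lhs => rw [aSkipBlock]
            rw [dif_pos (by omega)]
            have hx : src[i - 1 + 1]! = '/' := by
              have e : i - 1 + 1 = i := by omega
              rw [e, hget]; exact hsl
            rw [if_pos ⟨hstar, hx⟩]
          rw [hA]
          have e : i - 1 + 2 = i + 1 := by omega
          rw [e]
        · -- still inside the block comment
          have hA : aSkipBlock src (i - 1) = aSkipBlock src i := by
            conv_lhs => rw [aSkipBlock]
            rw [dif_pos (by omega)]
            have hneg : ¬ (src[i-1]! = '*' ∧ src[i - 1 + 1]! = '/') := by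
              rintro ⟨_, h2⟩
              have e : i - 1 + 1 = i := by omega
              rw [e, hget] at h2
              exact hsl h2
            rw [if_neg hneg]
            congr 1; omega
          rw [hA]
          have hstep : bLoop (src[i] :: src.drop (i + 1)) .block false true prev out
              = bLoop (src.drop (i + 1)) .block false (decide (src[i] = '*')) (some src[i]) out := by
            conv_lhs => rw [bLoop.eq_def]
            simp [hsl]
          rw [hstep]
          by_cases hb : src[i] = '*'
          · have := (IH (i + 1) (by omega)).2.2.2 true (some src[i]) out
              (fun _ => ⟨by omega, by simpa [hget] using hb⟩)
            rw [if_pos rfl] at this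
            simpa [hb] using this
          · have hthis := (IH (i + 1) (by omega)).2.2.2 false (some src[i]) out (by simp)
            rw [if_neg Bool.false_ne_true] at hthis
            by_cases h2 : i + 1 < src.length
            · have hA2 : aSkipBlock src i = aSkipBlock src (i + 1) := by
                conv_lhs => rw [aSkipBlock]
                rw [dif_pos h2]
                rw [if_neg (by rintro ⟨h1, _⟩; rw [hget] at h1; exact hb h1)]
              rw [hA2]
              simpa [hb] using hthis
            · have e1 : aSkipBlock src i = i := aSkipBlock_ge src i (by omega)
              have e2 : aSkipBlock src (i + 1) = i + 1 := aSkipBlock_ge src (i + 1) (by omega)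
              rw [e2, aLoop_ge src (i + 1 + 2) none out (by omega)] at hthis
              rw [e1, aLoop_ge src (i + 2) none out (by omega)]
              simpa [hb] using hthis
      | false =>
        rw [if_neg Bool.false_ne_true]
        have hstep : bLoop (src[i] :: src.drop (i + 1)) .block false false prev out
            = bLoop (src.drop (i + 1)) .block false (decide (src[i] = '*')) (some src[i]) out := by
          conv_lhs => rw [bLoop.eq_def]
          simp
        rw [hstep]
        by_cases hb : src[i] = '*'
        · have := (IH (i + 1) (by omega)).2.2.2 true (some src[i]) out
            (fun _ => ⟨by omega, by simpa [hget] using hb⟩)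
          rw [if_pos rfl] at this
          simpa [hb] using this
        · have hthis := (IH (i + 1) (by omega)).2.2.2 false (some src[i]) out (by simp)
          rw [if_neg Bool.false_ne_true] at hthis
          by_cases h2 : i + 1 < src.length
          · have hA2 : aSkipBlock src i = aSkipBlock src (i + 1) := by
              conv_lhs => rw [aSkipBlock]
              rw [dif_pos h2]
              rw [if_neg (by rintro ⟨h1, _⟩; rw [hget] at h1; exact hb h1)]
            rw [hA2]
            simpa [hb] using hthis
          · have e1 : aSkipBlock src i = i := aSkipBlock_ge src i (by omega)
            have e2 : aSkipBlock src (i + 1) = i + 1 := aSkipBlock_ge src (i + 1) (by omega)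
            rw [e2, aLoop_ge src (i + 1 + 2) none out (by omega)] at hthis
            rw [e1, aLoop_ge src (i + 2) none out (by omega)]
            simpa [hb] using hthis

-- ===== VERDICT (by name: the statement is the Claim_ definition above) =====
theorem strip_js_comments_spec : Claim_equal_strip_js_comments := by
  intro source _
  unfold Spec_strip_js_comments strip_js_comments strip_js_comments_alt
  have := (inv_all source.toList source.toList.length 0 (by omega)).1 false none []
  rw [this]
  rfl
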